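-- pv_equiv track=rewrite | github.com/humblecrip/open_source_multiple_person_radar_patent | python_implementation/universal_detector.py | _cluster_detections
-- ===== SOURCE A (Python) =====
-- def _cluster_detections(detected_bins, max_gap=3):
--     """聚类相邻的检测"""
--     if len(detected_bins) == 0:
--         return []
--
--     clusters = []
--     current_cluster = [detected_bins[0]]
--
--     for i in range(1, len(detected_bins)):
--         if detected_bins[i] - detected_bins[i-1] <= max_gap:
--             current_cluster.append(detected_bins[i])
--         else:
--             clusters.append(current_cluster)
--             current_cluster = [detected_bins[i]]
--
--     clusters.append(current_cluster)
--     return clusters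
-- ===== SOURCE B (Python) =====
-- def _cluster_detections(detected_bins, max_gap=3):
--     n = len(detected_bins)
--     if n == 0:
--         return []
--     cuts = [i for i in range(1, n)
--             if detected_bins[i] - detected_bins[i - 1] > max_gap]
--     bounds = [0] + cuts + [n]
--     return [detected_bins[a:b] for a, b in zip(bounds, bounds[1:])]
-- ===== Notes on version B (the rewrite author's own statement) =====
-- stated objective: alternative
-- what changed: B finds the cut positions in one pass, forms the boundary list (zero, the cuts, the length), and emits clusters as slices between consecutive boundaries, instead of A's streaming append-or-reset accumulation of a current cluster.
import Mathlib
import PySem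

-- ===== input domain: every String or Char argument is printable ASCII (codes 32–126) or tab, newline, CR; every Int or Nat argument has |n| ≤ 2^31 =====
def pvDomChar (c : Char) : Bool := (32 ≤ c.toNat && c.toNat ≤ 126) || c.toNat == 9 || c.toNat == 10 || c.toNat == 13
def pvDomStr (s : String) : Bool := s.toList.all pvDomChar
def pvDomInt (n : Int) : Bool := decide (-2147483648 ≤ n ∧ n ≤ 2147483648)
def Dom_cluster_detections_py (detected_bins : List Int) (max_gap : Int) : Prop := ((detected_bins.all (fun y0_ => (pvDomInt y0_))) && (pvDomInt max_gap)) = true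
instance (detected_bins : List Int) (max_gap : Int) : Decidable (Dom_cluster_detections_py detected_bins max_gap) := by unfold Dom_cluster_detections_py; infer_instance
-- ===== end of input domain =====

-- B partitions by precomputed boundary positions instead of A's streaming accumulator; alternative decomposition, same cost.

-- ===== PORT A =====
def cluster_detections_py (detected_bins : List Int) (max_gap : Int) : List (List Int) :=
  if detected_bins.length = 0 then []
  else
    let s := (PySem.List.pyRange 1 (detected_bins.length : Int) 1).foldl
      (fun (s : List (List Int) × List Int) i =>
        if PySem.List.pyGetD detected_bins i 0 - PySem.List.pyGetD detected_bins (i-1) 0 ≤ max_gap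
        then (s.1, s.2 ++ [PySem.List.pyGetD detected_bins i 0])
        else (s.1 ++ [s.2], [PySem.List.pyGetD detected_bins i 0]))
      ([], [PySem.List.pyGetD detected_bins 0 0])
    s.1 ++ [s.2]

-- ===== PORT B =====
def cluster_detections_py_alt (detected_bins : List Int) (max_gap : Int) : List (List Int) :=
  let n : Nat := detected_bins.length
  if n = 0 then []
  else
    let cuts := (PySem.List.pyRange 1 (n : Int) 1).filter
      (fun i => decide (max_gap < PySem.List.pyGetD detected_bins i 0 - PySem.List.pyGetD detected_bins (i-1) 0))
    let bounds : List Int := 0 :: (cuts ++ [(n : Int)])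
    (bounds.zip bounds.tail).map (fun ab => PySem.List.slice detected_bins (some ab.1) (some ab.2))

-- ===== PRECONDITION & SPEC =====
def Spec_cluster_detections_py (detected_bins : List Int) (max_gap : Int) (out : List (List Int)) : Prop := out = cluster_detections_py_alt detected_bins max_gap
instance (detected_bins : List Int) (max_gap : Int) (out : List (List Int)) : Decidable (Spec_cluster_detections_py detected_bins max_gap out) := by unfold Spec_cluster_detections_py; infer_instance

-- ===== CLAIM (what is proved, stated in full; the proofs are below) =====
def Claim_equal_cluster_detections_py : Prop := ∀ (detected_bins : List Int) (max_gap : Int), Dom_cluster_detections_py detected_bins max_gap → Spec_cluster_detections_py detected_bins max_gap (cluster_detections_py detected_bins max_gap)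

-- ===== LEMMAS AND PROOFS =====

-- cut predicate and the list of cut positions strictly below k
def pvCutP (l : List Int) (g : Int) (i : Int) : Bool :=
  decide (g < PySem.List.pyGetD l i 0 - PySem.List.pyGetD l (i-1) 0)

def pvCuts (l : List Int) (g : Int) (k : Int) : List Int :=
  (PySem.List.pyRange 1 k 1).filter (pvCutP l g)

def pvPairs (bs : List Int) : List (Int × Int) := bs.zip bs.tail

lemma pvPairs_concat : ∀ (bs : List Int) (x : Int) (h : bs ≠ []),
    pvPairs (bs ++ [x]) = pvPairs bs ++ [(bs.getLast h, x)] := by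
  intro bs
  induction bs with
  | nil => intro x h; exact absurd rfl h
  | cons a bs ih =>
    intro x h
    cases bs with
    | nil => simp [pvPairs]
    | cons b bs' =>
      have hih := ih x (by simp)
      simp only [pvPairs, List.cons_append, List.tail_cons, List.zip_cons_cons] at hih ⊢
      rw [hih]
      simp [List.getLast_cons]

lemma pvSlice_ext (l : List Int) (a k : Int) (h0 : 0 ≤ a) (hak : a ≤ k)
    (hk : k < (l.length : Int)) :
    PySem.List.slice l (some a) (some k) ++ [PySem.List.pyGetD l k 0]
      = PySem.List.slice l (some a) (some (k+1)) := by
  obtain ⟨an, rfl⟩ := Int.eq_ofNat_of_zero_le h0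
  obtain ⟨kn, rfl⟩ := Int.eq_ofNat_of_zero_le (le_trans h0 hak)
  have hak' : an ≤ kn := by exact_mod_cast hak
  have hk' : kn < l.length := by exact_mod_cast hk
  have h1 : ((kn : Int) + 1) = ((kn + 1 : Nat) : Int) := by push_cast; ring
  rw [h1, PySem.List.slice_natCast, PySem.List.slice_natCast, PySem.List.pyGetD_natCast]
  have h2 : kn + 1 - an = (kn - an) + 1 := by omega
  rw [h2, List.take_add_one]
  have h3 : (l.drop an)[kn - an]? = some l[kn] := by
    rw [List.getElem?_drop]
    have h4 : an + (kn - an) = kn := by omega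
    rw [h4, List.getElem?_eq_getElem hk']
  rw [h3]
  simp [List.getD_eq_getElem?_getD, List.getElem?_eq_getElem hk']

lemma pvSlice_single (l : List Int) (k : Int) (h0 : 0 ≤ k) (hk : k < (l.length : Int)) :
    PySem.List.slice l (some k) (some (k+1)) = [PySem.List.pyGetD l k 0] := by
  rw [← pvSlice_ext l k k h0 le_rfl hk]
  obtain ⟨kn, rfl⟩ := Int.eq_ofNat_of_zero_le h0
  rw [PySem.List.slice_natCast]
  simp

lemma pvCuts_mem (l : List Int) (g : Int) (k : Int) {x : Int}
    (hx : x ∈ (0 : Int) :: pvCuts l g k) : 0 ≤ x ∧ x < max 1 k := by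
  rcases List.mem_cons.mp hx with h | h
  · subst h; omega
  · have hm := (List.mem_filter.mp h).1
    rw [PySem.List.mem_pyRange_one] at hm
    omega

lemma pvGetLast_nonneg_lt (l : List Int) (g : Int) (k : Int) :
    0 ≤ ((0 : Int) :: pvCuts l g k).getLast (by simp) ∧
      ((0 : Int) :: pvCuts l g k).getLast (by simp) < max 1 k :=
  pvCuts_mem l g k (List.getLast_mem _)

lemma pvAssemble (f : Int × Int → List Int) (c : List Int) (n : Int) :
    (pvPairs ((0 : Int) :: c)).map f ++ [f (((0 : Int) :: c).getLast (by simp), n)]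
      = (pvPairs (((0 : Int) :: c) ++ [n])).map f := by
  rw [pvPairs_concat _ _ (by simp), List.map_append]
  rfl

-- the loop invariant: after indices 1..k-1, A's state is (the closed clusters as
-- slices between consecutive boundaries, the open slice from the last boundary to k)
lemma pvInv (l : List Int) (g : Int) (k : Nat) (h1 : 1 ≤ k) (h2 : k ≤ l.length) :
    (PySem.List.pyRange 1 (k : Int) 1).foldl
      (fun (s : List (List Int) × List Int) i =>
        if PySem.List.pyGetD l i 0 - PySem.List.pyGetD l (i-1) 0 ≤ g
        then (s.1, s.2 ++ [PySem.List.pyGetD l i 0])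
        else (s.1 ++ [s.2], [PySem.List.pyGetD l i 0]))
      ([], [PySem.List.pyGetD l 0 0])
    = ((pvPairs ((0 : Int) :: pvCuts l g (k : Int))).map
         (fun ab => PySem.List.slice l (some ab.1) (some ab.2)),
       PySem.List.slice l
         (some (((0 : Int) :: pvCuts l g (k : Int)).getLast (by simp))) (some (k : Int))) := by
  induction k, h1 using Nat.le_induction with
  | base =>
    rw [show ((1 : Nat) : Int) = 1 from rfl, PySem.List.pyRange_one_eq_nil le_rfl]
    have hc : pvCuts l g 1 = [] := by
      rw [pvCuts, PySem.List.pyRange_one_eq_nil le_rfl]; rfl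
    rw [hc]
    refine Prod.ext (by simp [pvPairs]) ?_
    show [PySem.List.pyGetD l 0 0] = PySem.List.slice l (some 0) (some 1)
    rw [show (0 : Int) = ((0 : Nat) : Int) from rfl, show (1 : Int) = ((1 : Nat) : Int) from rfl,
      PySem.List.slice_natCast]
    cases l with
    | nil => simp at h2
    | cons y ys => simp
  | succ k hk ih =>
    have hk2 : k ≤ l.length := by omega
    have hkl : (k : Int) < (l.length : Int) := by exact_mod_cast h2
    have hcast : (((k + 1 : Nat)) : Int) = (k : Int) + 1 := by push_cast; ring
    rw [hcast, PySem.List.pyRange_one_succ_right (by exact_mod_cast hk : (1:Int) ≤ (k:Int)),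
      List.foldl_append, ih hk2]
    have hcuts : pvCuts l g ((k : Int) + 1)
        = pvCuts l g (k : Int) ++ if pvCutP l g (k : Int) then [(k : Int)] else [] := by
      rw [pvCuts, pvCuts, PySem.List.pyRange_one_succ_right (by exact_mod_cast hk : (1:Int) ≤ (k:Int)),
        List.filter_append]
      cases hpc : pvCutP l g (k : Int) <;> simp [List.filter_nil, hpc]
    have hlast := pvGetLast_nonneg_lt l g (k : Int)
    by_cases hc : PySem.List.pyGetD l (k : Int) 0 - PySem.List.pyGetD l ((k : Int) - 1) 0 ≤ g
    · have hp : pvCutP l g (k : Int) = false := by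
        simp only [pvCutP, decide_eq_false_iff_not]; omega
      have hcuts' : pvCuts l g ((k : Int) + 1) = pvCuts l g (k : Int) := by
        rw [hcuts, hp]; simp
      simp only [List.foldl_cons, List.foldl_nil, if_pos hc, hcuts']
      refine Prod.ext rfl ?_
      show PySem.List.slice l (some (((0 : Int) :: pvCuts l g (k : Int)).getLast (by simp)))
            (some (k : Int)) ++ [PySem.List.pyGetD l (k : Int) 0]
          = PySem.List.slice l (some (((0 : Int) :: pvCuts l g (k : Int)).getLast (by simp)))
            (some ((k : Int) + 1))
      exact pvSlice_ext l _ (k : Int) hlast.1 (by omega) hkl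
    · have hp : pvCutP l g (k : Int) = true := by
        simp only [pvCutP, decide_eq_true_eq]; omega
      have hcuts' : pvCuts l g ((k : Int) + 1) = pvCuts l g (k : Int) ++ [(k : Int)] := by
        rw [hcuts, hp]; simp
      simp only [List.foldl_cons, List.foldl_nil, if_neg hc, hcuts', ← List.cons_append]
      refine Prod.ext ?_ ?_
      · show _ ++ [_] = (pvPairs (((0 : Int) :: pvCuts l g (k : Int)) ++ [(k : Int)])).map _
        rw [← pvAssemble]
      · show ([PySem.List.pyGetD l (k : Int) 0] : List Int)
          = PySem.List.slice l
              (some ((((0 : Int) :: pvCuts l g (k : Int)) ++ [(k : Int)]).getLast (by simp)))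
              (some ((k : Int) + 1))
        rw [List.getLast_append_singleton, pvSlice_single l (k : Int) (by omega) hkl]

theorem cluster_detections_py_eq (l : List Int) (g : Int) :
    cluster_detections_py l g = cluster_detections_py_alt l g := by
  by_cases hl : l.length = 0
  · unfold cluster_detections_py cluster_detections_py_alt
    simp [hl]
  · have h1 : 1 ≤ l.length := Nat.pos_of_ne_zero hl
    unfold cluster_detections_py cluster_detections_py_alt
    simp only [if_neg hl, pvInv l g l.length h1 le_rfl]
    exact pvAssemble _ (pvCuts l g (l.length : Int)) (l.length : Int)

-- ===== VERDICT (by name: the statement is the Claim_ definition above) =====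
theorem cluster_detections_py_spec : Claim_equal_cluster_detections_py := by
  intro l g _
  exact cluster_detections_py_eq l g
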